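-- pv_equiv track=rewrite | github.com/usnistgov/SP800-90B_EntropyAssessment | shuffle_tests.py | directional_runs_scores
-- ===== SOURCE A (Python) =====
-- def directional_runs_scores(dataset, stats):
--     # 1. The temporary data subset temp is produced from the data subset
--     #    as follows:
--     #    a. If the input is not binary:
--     #       For i = 0 to (the length of original data subset) - 2:
--     #            If s_i < s_i+1, then temp_i = 1
--     #            Else if s_i > s_i+1, then temp_i = -1
--     #            Else temp_i = 0
--     #    b. If the input is binary:
--     #       ...first require processing in which bits are combined into bytes.
--     #       Then, a new data subset is created from the Hamming weights of the
--     #       successive bytes and then the temporary dataset is generated from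
--     #       this.
--     #       For i to (length of original data subset)/8 - 1:
--     #            W_i = hamming_weight(s_i,...,s_i+7)
--     #       For i = 0 to (length of sequence W) - 2:
--     #            If s_i < s_i+1, then temp_i = 1
--     #            Else if s_i > s_i+1, then temp_i = -1
--     #            Else temp_i = 0
--     is_binary = stats[2]
--     s = dataset
--     if not is_binary:
--         temp = [1 if s[i] < s[i+1] else -1 if s[i] > s[i+1] else 0 for i in range(len(s)-1)]
--     else:
--         W = [sum(s[i:i+8]) for i in range(0, len(s), 8)]
--         temp = [1 if W[i]<W[i+1] else -1 if W[i]>W[i+1] else 0 for i in range(len(W)-1)]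
--
--     # 2. Calculate the scores on the temporary data subset
--     runtype = 0 # runtype of 0 to handle 'temp' starting with a run of '0's
--     current_run = 0
--     longest_run = 0
--     upcount = 0
--     downcount = 0
--     runs = 0
--     for current in temp:
--         # current symbol is a '1'
--         if current == 1:
--             upcount += 1
--             if runtype == 1:
--                 current_run += 1
--             else:
--                 # start a new run of '1's
--                 if current_run > longest_run:
--                     longest_run = current_run
--                 runtype = 1
--                 current_run = 1
--                 runs += 1
--         # current symbol is a '-1'
--         elif current == -1:
--             downcount += 1
--             if runtype == -1:
--                 current_run += 1
--             else:
--                 # start a new run of '-1's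
--                 if current_run > longest_run:
--                     longest_run = current_run
--                 runtype = -1
--                 current_run = 1
--                 runs += 1
--         # current symbol is a '0'
--         # 'runtype = 0' means we are still in a run of '0's
--         # at the start of the 'temp' data subset
--         elif runtype != 0:
--             # increment length of current run, whether '1's or '-1's
--             current_run += 1
--
--     # handle last run
--     if current_run > longest_run:
--         longest_run = current_run
--
--     return runs, longest_run, max(upcount, downcount)
-- ===== SOURCE B (Python) =====
-- def directional_runs_scores(dataset, stats):
--     s = dataset
--     if not stats[2]:
--         temp = [(x < y) - (y < x) for x, y in zip(s, s[1:])]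
--     else:
--         W = []
--         i = 0
--         while i < len(s):
--             W.append(sum(s[i:i+8]))
--             i += 8
--         temp = [(x < y) - (y < x) for x, y in zip(W, W[1:])]
--
--     upcount = temp.count(1)
--     downcount = temp.count(-1)
--
--     # run boundaries: index of the first nonzero entry, then every later index
--     # whose nonzero sign differs from the previous nonzero sign
--     boundaries = []
--     last = 0
--     for i, t in enumerate(temp):
--         if t != 0 and t != last:
--             boundaries.append(i)
--             last = t
--
--     runs = len(boundaries)
--     longest_run = max((b - a for a, b in zip(boundaries, boundaries[1:] + [len(temp)])),
--                       default=0)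
--     return runs, longest_run, max(upcount, downcount)
-- ===== Notes on version B (the rewrite author's own statement) =====
-- stated objective: alternative
-- what changed: A's single six-variable stateful scoring loop is replaced by direct counts (temp.count(1)/temp.count(-1)) plus a run-boundary index list whose consecutive gaps (last run extended to len(temp)) give the number of runs and the longest run via max(); the binary-branch W is built by peeling 8-element chunks instead of indexing with range(0, len, 8).
import Mathlib
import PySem

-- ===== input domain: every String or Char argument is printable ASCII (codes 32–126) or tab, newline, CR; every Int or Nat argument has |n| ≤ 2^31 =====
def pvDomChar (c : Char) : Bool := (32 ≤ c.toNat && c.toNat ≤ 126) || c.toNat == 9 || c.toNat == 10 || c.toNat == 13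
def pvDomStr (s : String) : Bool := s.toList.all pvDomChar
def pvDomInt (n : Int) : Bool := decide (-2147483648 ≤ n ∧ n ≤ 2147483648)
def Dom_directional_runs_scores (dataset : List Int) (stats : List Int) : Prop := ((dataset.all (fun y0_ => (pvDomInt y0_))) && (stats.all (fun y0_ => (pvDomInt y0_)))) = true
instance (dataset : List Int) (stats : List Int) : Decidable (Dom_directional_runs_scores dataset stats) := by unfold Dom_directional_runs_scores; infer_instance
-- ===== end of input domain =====

-- B replaces A's six-variable stateful scoring loop by direct counts plus a
-- run-boundary index list whose gaps give the run lengths (objective: alternative).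

-- ===== PORT A =====
-- A's scoring loop over temp; the trailing "handle last run" and the return tuple
-- are folded into the base case.
def drsLoopA : List Int → Int → Int → Int → Int → Int → Int → Int × Int × Int
  | [], _runtype, current_run, longest_run, upcount, downcount, runs =>
      (runs, if current_run > longest_run then current_run else longest_run,
       max upcount downcount)
  | current :: rest, runtype, current_run, longest_run, upcount, downcount, runs =>
      if current = 1 then
        if runtype = 1 then
          drsLoopA rest runtype (current_run + 1) longest_run (upcount + 1) downcount runs
        else
          drsLoopA rest 1 1 (if current_run > longest_run then current_run else longest_run)
            (upcount + 1) downcount (runs + 1)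
      else if current = -1 then
        if runtype = -1 then
          drsLoopA rest runtype (current_run + 1) longest_run upcount (downcount + 1) runs
        else
          drsLoopA rest (-1) 1 (if current_run > longest_run then current_run else longest_run)
            upcount (downcount + 1) (runs + 1)
      else if runtype ≠ 0 then
        drsLoopA rest runtype (current_run + 1) longest_run upcount downcount runs
      else
        drsLoopA rest runtype current_run longest_run upcount downcount runs

def directional_runs_scores (dataset : List Int) (stats : List Int) : Int × Int × Int :=
  let is_binary := PySem.List.pyGetD stats 2 0   -- stats[2]; Pre_ guarantees the index exists
  let s := dataset
  let temp :=
    if is_binary = 0 then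
      -- indices i and i+1 are in range, so getD is exact for s[i], s[i+1]
      (List.range (s.length - 1)).map (fun i =>
        if s.getD i 0 < s.getD (i + 1) 0 then (1 : Int)
        else if s.getD i 0 > s.getD (i + 1) 0 then -1 else 0)
    else
      let W := (PySem.List.pyRange 0 (s.length : Int) 8).map
        (fun i => (PySem.List.slice s (some i) (some (i + 8))).sum)
      (List.range (W.length - 1)).map (fun i =>
        if W.getD i 0 < W.getD (i + 1) 0 then (1 : Int)
        else if W.getD i 0 > W.getD (i + 1) 0 then -1 else 0)
  drsLoopA temp 0 0 0 0 0 0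

-- ===== PORT B =====
-- W by Source B's index-stepping while loop: i starts at 0 and advances by 8
def drsWhileW (s : List Int) (i : Nat) : List Int :=
  if _h : i < s.length then
    (PySem.List.slice s (some (i : Int)) (some ((i : Int) + 8))).sum :: drsWhileW s (i + 8)
  else []
  termination_by s.length - i

-- temp over consecutive pairs; (x < y) - (y < x) as int arithmetic on bools
def drsTemp (u : List Int) : List Int :=
  (u.zip (u.drop 1)).map (fun p =>
    (if p.1 < p.2 then (1 : Int) else 0) - (if p.2 < p.1 then 1 else 0))

-- Source B's boundary scan (enumerate ported as an index counter)
def drsBounds : List Int → Int → List Int → Int → List Int × Int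
  | [], _i, bs, last => (bs, last)
  | t :: rest, i, bs, last =>
      if t ≠ 0 ∧ t ≠ last then drsBounds rest (i + 1) (bs ++ [i]) t
      else drsBounds rest (i + 1) bs last

def directional_runs_scores_alt (dataset : List Int) (stats : List Int) : Int × Int × Int :=
  let s := dataset
  let temp :=
    if PySem.List.pyGetD stats 2 0 = 0 then drsTemp s else drsTemp (drsWhileW s 0)
  let upcount : Int := PySem.List.count temp 1
  let downcount : Int := PySem.List.count temp (-1)
  let boundaries := (drsBounds temp 0 [] 0).1
  let runs : Int := boundaries.length
  let longest_run := PySem.List.maxD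
    ((boundaries.zip (boundaries.drop 1 ++ [(temp.length : Int)])).map (fun p => p.2 - p.1))
    (fun y => y) 0
  (runs, longest_run, max upcount downcount)

-- ===== PRECONDITION & SPEC =====
-- Pre_ excludes only the inputs where A raises: stats[2] needs len(stats) ≥ 3.
def Pre_directional_runs_scores (dataset : List Int) (stats : List Int) : Prop :=
  3 ≤ stats.length
instance (dataset : List Int) (stats : List Int) : Decidable (Pre_directional_runs_scores dataset stats) := by unfold Pre_directional_runs_scores; infer_instance

def pvWitness_directional_runs_scores : List Int × List Int := ([2, 1, 1, 5, 5], [0, 0, 0])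

def Spec_directional_runs_scores (dataset : List Int) (stats : List Int) (out : Int × Int × Int) : Prop := out = directional_runs_scores_alt dataset stats
instance (dataset : List Int) (stats : List Int) (out : Int × Int × Int) : Decidable (Spec_directional_runs_scores dataset stats out) := by unfold Spec_directional_runs_scores; infer_instance

-- ===== CLAIM (what is proved, stated in full; the proofs are below) =====
def Claim_equal_directional_runs_scores : Prop := ∀ (dataset : List Int) (stats : List Int), Dom_directional_runs_scores dataset stats → Pre_directional_runs_scores dataset stats → Spec_directional_runs_scores dataset stats (directional_runs_scores dataset stats)

-- ===== LEMMAS AND PROOFS =====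

-- internal gaps of the boundary list, and A's running longest over them
def drsIGaps (bs : List Int) : List Int := (bs.zip (bs.drop 1)).map (fun p => p.2 - p.1)
def drsIMax (bs : List Int) : Int := (drsIGaps bs).foldl max 0

lemma drsTemp_mem (u : List Int) : ∀ t ∈ drsTemp u, t = 1 ∨ t = -1 ∨ t = 0 := by
  intro t ht
  simp only [drsTemp, List.mem_map] at ht
  obtain ⟨p, -, rfl⟩ := ht
  split_ifs <;> simp

-- A's non-binary comprehension builds the same temp as B's pairwise map
lemma temp_eq (u : List Int) :
    (List.range (u.length - 1)).map (fun i =>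
      if u.getD i 0 < u.getD (i + 1) 0 then (1 : Int)
      else if u.getD i 0 > u.getD (i + 1) 0 then -1 else 0) = drsTemp u := by
  apply List.ext_getElem
  · simp [drsTemp]
  · intro i h1 h2
    have hlen : i < u.length - 1 := by simpa using h1
    simp only [List.getElem_map, List.getElem_range, drsTemp, List.getElem_zip,
      List.getElem_drop]
    rw [List.getD_eq_getElem u 0 (by omega), List.getD_eq_getElem u 0 (by omega)]
    have hidx : u[1 + i]'(by omega) = u[i + 1]'(by omega) := by congr 1; omega
    rw [hidx]
    rcases lt_trichotomy (u[i]'(by omega)) (u[i + 1]'(by omega)) with h | h | h <;>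
      split_ifs <;> first | rfl | omega

-- proof-side chunk decomposition: both W constructions equal this list
def drsChunks : List Int → List Int
  | [] => []
  | x :: xs => ((x :: xs).take 8).sum :: drsChunks ((x :: xs).drop 8)
  termination_by s => s.length
  decreasing_by simp

lemma whileW_eq_aux : ∀ (f : Nat) (s : List Int) (i : Nat), s.length - i ≤ f →
    drsWhileW s i = drsChunks (s.drop i) := by
  intro f
  induction f with
  | zero =>
    intro s i h
    rw [drsWhileW, dif_neg (by omega), List.drop_eq_nil_of_le (by omega)]
    simp [drsChunks]
  | succ f ihf =>
    intro s i h
    by_cases hi : i < s.length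
    · obtain ⟨x, xs, hx⟩ : ∃ x xs, s.drop i = x :: xs := by
        rcases hd : s.drop i with _ | ⟨x, xs⟩
        · exact absurd (List.drop_eq_nil_iff.mp hd) (by omega)
        · exact ⟨x, xs, rfl⟩
      rw [drsWhileW, dif_pos hi, ihf s (i + 8) (by omega), hx, drsChunks]
      refine congrArg₂ _ ?_ ?_
      · rw [show ((i : Int) + 8) = ((i : Int) + ((8 : Nat) : Int)) by norm_num,
          PySem.List.slice_natCast_add, hx]
      · rw [← hx, List.drop_drop]
    · rw [drsWhileW, dif_neg hi, List.drop_eq_nil_of_le (by omega)]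
      simp [drsChunks]

lemma whileW_eq (s : List Int) : drsWhileW s 0 = drsChunks s := by
  simpa using whileW_eq_aux (s.length) s 0 (by omega)

lemma chunks_eq_aux : ∀ (n : Nat) (s : List Int), s.length ≤ n →
    (List.range ((s.length + 7) / 8)).map (fun k => ((s.drop (8 * k)).take 8).sum)
      = drsChunks s := by
  intro n
  induction n with
  | zero =>
    intro s hs
    have : s = [] := by cases s <;> simp_all
    subst this; simp [drsChunks]
  | succ n ih =>
    intro s hs
    match s with
    | [] => simp [drsChunks]
    | x :: xs =>
      rw [show ((x :: xs).length + 7) / 8 = ((((x :: xs).drop 8).length + 7) / 8) + 1 by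
        simp only [List.length_drop, List.length_cons]; omega]
      rw [List.range_succ_eq_map, List.map_cons, List.map_map, drsChunks]
      refine congrArg₂ _ (by simp) ?_
      rw [← ih ((x :: xs).drop 8)
        (by simp only [List.length_drop]; omega)]
      refine List.map_congr_left ?_
      intro k _
      simp only [Function.comp_apply, List.drop_drop, Nat.mul_succ]
      rw [Nat.add_comm 8 (8 * k)]

-- A's slice comprehension over range(0, len, 8) builds the same W as B's chunk peeling
lemma chunks_eq (s : List Int) :
    (PySem.List.pyRange 0 (s.length : Int) 8).map
      (fun i => (PySem.List.slice s (some i) (some (i + 8))).sum) = drsChunks s := by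
  rw [PySem.List.pyRange_of_pos 0 (s.length : Int) (by norm_num)]
  rw [show (if (0 : Int) < (s.length : Int) then
        (((s.length : Int) - 0 + 8 - 1) / 8).toNat else 0) = (s.length + 7) / 8 by
      split_ifs with h <;> omega]
  rw [List.map_map, ← chunks_eq_aux s.length s le_rfl]
  refine List.map_congr_left ?_
  intro k _
  simp only [Function.comp_apply, zero_add]
  rw [show (8 * (k : Int)) = ((8 * k : Nat) : Int) by push_cast; ring,
    show (((8 * k : Nat) : Int) + 8) = ((8 * k : Nat) : Int) + ((8 : Nat) : Int) by norm_num,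
    PySem.List.slice_natCast_add]

lemma igaps_append_last : ∀ (bs : List Int) (b i : Int), bs.getLast? = some b →
    drsIGaps (bs ++ [i]) = drsIGaps bs ++ [i - b] := by
  intro bs
  induction bs with
  | nil => intro b i hb; simp at hb
  | cons x t ih =>
    intro b i hb
    cases t with
    | nil => simp at hb; subst hb; simp [drsIGaps]
    | cons y t' =>
      rw [List.getLast?_cons_cons] at hb
      have := ih b i hb
      simp only [drsIGaps, List.cons_append, List.drop_succ_cons, List.drop_zero] at this ⊢
      simp [List.zip_cons_cons, List.map_cons, this]

lemma igaps_concat : ∀ (bs : List Int) (b n : Int), bs.getLast? = some b →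
    ((bs.zip (bs.drop 1 ++ [n])).map (fun p => p.2 - p.1)) = drsIGaps bs ++ [n - b] := by
  intro bs
  induction bs with
  | nil => intro b n hb; simp at hb
  | cons x t ih =>
    intro b n hb
    cases t with
    | nil => simp at hb; subst hb; simp [drsIGaps]
    | cons y t' =>
      rw [List.getLast?_cons_cons] at hb
      have := ih b n hb
      simp only [drsIGaps, List.cons_append, List.drop_succ_cons, List.drop_zero] at this ⊢
      simp [List.zip_cons_cons, List.map_cons, this]

lemma imax_concat (bs : List Int) (b i : Int) (hb : bs.getLast? = some b) :
    drsIMax (bs ++ [i]) = max (drsIMax bs) (i - b) := by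
  rw [drsIMax, igaps_append_last bs b i hb, List.foldl_append]
  simp [drsIMax]

lemma igaps_pos : ∀ (bs : List Int), List.IsChain (· < ·) bs → ∀ y ∈ drsIGaps bs, 0 < y := by
  intro bs
  induction bs with
  | nil => intro _ y hy; simp [drsIGaps] at hy
  | cons x t ih =>
    intro hch y hy
    cases t with
    | nil => simp [drsIGaps] at hy
    | cons z t' =>
      rw [List.isChain_cons_cons] at hch
      simp only [drsIGaps, List.drop_succ_cons, List.drop_zero, List.zip_cons_cons,
        List.map_cons, List.mem_cons] at hy
      rcases hy with rfl | hy
      · omega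
      · exact ih hch.2 y (by simpa [drsIGaps] using hy)

lemma maxD_gaps (bs : List Int) (b n : Int) (hb : bs.getLast? = some b)
    (hpos : ∀ y ∈ drsIGaps bs, 0 < y) (hbn : b < n) :
    PySem.List.maxD ((bs.zip (bs.drop 1 ++ [n])).map (fun p => p.2 - p.1)) (fun y => y) 0
      = max (drsIMax bs) (n - b) := by
  rw [igaps_concat bs b n hb]
  rcases hg : drsIGaps bs with _ | ⟨g, gs⟩
  · simp only [List.nil_append]
    rw [PySem.List.maxD, PySem.List.max?_id_cons]
    simp only [List.foldl_nil, Option.getD_some, drsIMax, hg, List.foldl_nil]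
    omega
  · have hgpos : 0 < g := hpos g (by rw [hg]; exact List.mem_cons_self ..)
    simp only [List.cons_append]
    rw [PySem.List.maxD, PySem.List.max?_id_cons]
    simp only [Option.getD_some, List.foldl_append, List.foldl_cons, List.foldl_nil]
    rw [drsIMax, hg, List.foldl_cons]
    rw [show max 0 g = g by omega]

lemma count_cons_int (a : Int) (l : List Int) (v : Int) :
    (PySem.List.count (a :: l) v : Int)
      = (if a = v then 1 else 0) + (PySem.List.count l v : Int) := by
  rw [PySem.List.count_eq, PySem.List.count_eq, List.count_cons]
  by_cases h : a = v
  · simp [h]; omega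
  · simp [h]

lemma chain_concat (bs : List Int) (i : Int) (h : List.IsChain (· < ·) bs)
    (hlt : ∀ b ∈ bs, b < i) : List.IsChain (· < ·) (bs ++ [i]) := by
  rw [List.isChain_append]
  refine ⟨h, by simp, ?_⟩
  intro x hx y hy
  simp only [List.head?_cons, Option.mem_def, Option.some.injEq] at hy
  subst hy
  exact hlt x (List.mem_of_getLast? (by simpa using hx))

-- the heart: A's stateful loop equals B's boundary-list reading, under the invariant
lemma loop_eq : ∀ (temp bs : List Int) (last cr lr up dn i n : Int),
    (∀ t ∈ temp, t = 1 ∨ t = -1 ∨ t = 0) →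
    n = i + (temp.length : Int) →
    (bs = [] → last = 0 ∧ cr = 0) →
    (∀ b, bs.getLast? = some b → last ≠ 0 ∧ cr = i - b) →
    lr = drsIMax bs →
    List.IsChain (· < ·) bs →
    (∀ b ∈ bs, b < i) →
    drsLoopA temp last cr lr up dn (bs.length : Int) =
      (((drsBounds temp i bs last).1.length : Int),
       PySem.List.maxD (((drsBounds temp i bs last).1.zip
           ((drsBounds temp i bs last).1.drop 1 ++ [n])).map
           (fun p => p.2 - p.1)) (fun y => y) 0,
       max (up + (PySem.List.count temp 1 : Int)) (dn + (PySem.List.count temp (-1) : Int))) := by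
  intro temp
  induction temp with
  | nil =>
    intro bs last cr lr up dn i n hmem hn h1 h2 hlr hchain hlt
    simp only [drsLoopA, drsBounds, List.length_nil, Int.natCast_zero, add_zero] at hn ⊢
    rcases hbs : bs with _ | ⟨x, t⟩
    · obtain ⟨hl, hc⟩ := h1 hbs
      subst hbs
      simp [hc, hlr, drsIMax, drsIGaps, PySem.List.maxD, PySem.List.max?,
        PySem.List.count]
    · rw [← hbs]
      have hbne : bs ≠ [] := by rw [hbs]; simp
      obtain ⟨b, hb⟩ := Option.isSome_iff_exists.mp (List.getLast?_isSome.mpr hbne)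
      obtain ⟨-, hcr⟩ := h2 b hb
      rw [maxD_gaps bs b n hb (igaps_pos bs hchain)
        (by have := hlt b (List.mem_of_getLast? hb); omega)]
      refine congrArg₂ _ rfl (congrArg₂ _ ?_ (by simp [PySem.List.count]))
      subst hlr hcr hn
      simp only [max_def]
      split_ifs <;> omega
  | cons t rest ih =>
    intro bs last cr lr up dn i n hmem hn h1 h2 hlr hchain hlt
    have hrestmem : ∀ x ∈ rest, x = 1 ∨ x = -1 ∨ x = 0 :=
      fun x hx => hmem x (List.mem_cons_of_mem _ hx)
    have hn' : n = (i + 1) + (rest.length : Int) := by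
      rw [hn]; simp; omega
    rcases hmem t (List.mem_cons_self ..) with rfl | rfl | rfl
    · -- t = 1
      by_cases hrt : last = 1
      · subst hrt
        have hbne : bs ≠ [] := fun h => by simpa using (h1 h).1
        simp only [drsLoopA, drsBounds, count_cons_int]
        norm_num
        rw [ih bs 1 (cr + 1) lr (up + 1) dn (i + 1) n hrestmem hn'
          (fun h => absurd h hbne)
          (fun b hb => ⟨one_ne_zero, by have := (h2 b hb).2; omega⟩)
          hlr hchain (fun b hb => by have := hlt b hb; omega)]
        simp only [PySem.List.count_eq, List.drop_one, Prod.mk.injEq]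
        try and_intros <;> first | trivial | (simp only [max_def]; split_ifs <;> omega)
      · simp only [drsLoopA, drsBounds, count_cons_int]
        norm_num [hrt, Ne.symm hrt]
        have hstep := ih (bs ++ [i]) 1 1
          (if cr > lr then cr else lr) (up + 1) dn (i + 1) n hrestmem hn'
          (by simp)
          (fun b hb => by
            rw [List.getLast?_concat] at hb
            rw [(Option.some.inj hb).symm]
            exact ⟨one_ne_zero, by ring⟩)
          ?_ (chain_concat bs i hchain hlt) ?_
        · rw [show ((bs ++ [i]).length : Int) = (bs.length : Int) + 1 by simp] at hstep
          rw [hstep]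
          simp only [PySem.List.count_eq, List.drop_one, Prod.mk.injEq]
          try and_intros <;> first | trivial | (simp only [max_def]; split_ifs <;> omega)
        · -- longest-run invariant for the extended boundary list
          rcases hbs : bs with _ | ⟨x, bt⟩
          · obtain ⟨hl, hc⟩ := h1 hbs
            subst hbs hc hlr
            simp [drsIMax, drsIGaps]
          · rw [← hbs]
            have hbne : bs ≠ [] := by rw [hbs]; simp
            obtain ⟨b, hb⟩ := Option.isSome_iff_exists.mp (List.getLast?_isSome.mpr hbne)
            obtain ⟨-, hcr⟩ := h2 b hb
            rw [imax_concat bs b i hb, ← hcr, ← hlr]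
            simp only [max_def]
            split_ifs <;> omega
        · intro b hb
          rcases List.mem_append.mp hb with h | h
          · have := hlt b h; omega
          · simp at h; omega
    · -- t = -1  (mirror of the t = 1 case)
      by_cases hrt : last = -1
      · subst hrt
        have hbne : bs ≠ [] := fun h => by simpa using (h1 h).1
        simp only [drsLoopA, drsBounds, count_cons_int]
        norm_num
        rw [ih bs (-1) (cr + 1) lr up (dn + 1) (i + 1) n hrestmem hn'
          (fun h => absurd h hbne)
          (fun b hb => ⟨by norm_num, by have := (h2 b hb).2; omega⟩)
          hlr hchain (fun b hb => by have := hlt b hb; omega)]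
        simp only [PySem.List.count_eq, List.drop_one, Prod.mk.injEq]
        try and_intros <;> first | trivial | (simp only [max_def]; split_ifs <;> omega)
      · simp only [drsLoopA, drsBounds, count_cons_int]
        norm_num [hrt, Ne.symm hrt]
        have hstep := ih (bs ++ [i]) (-1) 1
          (if cr > lr then cr else lr) up (dn + 1) (i + 1) n hrestmem hn'
          (by simp)
          (fun b hb => by
            rw [List.getLast?_concat] at hb
            rw [(Option.some.inj hb).symm]
            exact ⟨by norm_num, by ring⟩)
          ?_ (chain_concat bs i hchain hlt) ?_
        · rw [show ((bs ++ [i]).length : Int) = (bs.length : Int) + 1 by simp] at hstep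
          rw [hstep]
          simp only [PySem.List.count_eq, List.drop_one, Prod.mk.injEq]
          try and_intros <;> first | trivial | (simp only [max_def]; split_ifs <;> omega)
        · rcases hbs : bs with _ | ⟨x, bt⟩
          · obtain ⟨hl, hc⟩ := h1 hbs
            subst hbs hc hlr
            simp [drsIMax, drsIGaps]
          · rw [← hbs]
            have hbne : bs ≠ [] := by rw [hbs]; simp
            obtain ⟨b, hb⟩ := Option.isSome_iff_exists.mp (List.getLast?_isSome.mpr hbne)
            obtain ⟨-, hcr⟩ := h2 b hb
            rw [imax_concat bs b i hb, ← hcr, ← hlr]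
            simp only [max_def]
            split_ifs <;> omega
        · intro b hb
          rcases List.mem_append.mp hb with h | h
          · have := hlt b h; omega
          · simp at h; omega
    · -- t = 0
      simp only [drsLoopA, drsBounds, count_cons_int]
      norm_num
      by_cases hrt : last = 0
      · subst hrt
        have hbs : bs = [] := by
          rcases hbs : bs with _ | ⟨x, bt⟩
          · rfl
          · exfalso
            have hbne : bs ≠ [] := by rw [hbs]; simp
            obtain ⟨b, hb⟩ := Option.isSome_iff_exists.mp (List.getLast?_isSome.mpr hbne)
            exact (h2 b hb).1 rfl
        norm_num
        rw [ih bs 0 cr lr up dn (i + 1) n hrestmem hn' h1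
          (fun b hb => by rw [hbs] at hb; simp at hb)
          hlr hchain (fun b hb => by rw [hbs] at hb; simp at hb)]
        simp only [PySem.List.count_eq, List.drop_one]
      · rw [ih bs last (cr + 1) lr up dn (i + 1) n hrestmem hn'
          (fun h => absurd (h1 h).1 hrt)
          (fun b hb => ⟨(h2 b hb).1, by have := (h2 b hb).2; omega⟩)
          hlr hchain (fun b hb => by have := hlt b hb; omega)]
        rw [if_neg hrt]
        simp [PySem.List.count_eq, List.drop_one]

-- ===== VERDICT (by name: the statement is the Claim_ definition above) =====
theorem directional_runs_scores_spec : Claim_equal_directional_runs_scores := by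
  intro dataset stats _hdom _hpre
  unfold Spec_directional_runs_scores directional_runs_scores directional_runs_scores_alt
  simp only []
  have main : ∀ u : List Int,
      drsLoopA (drsTemp u) 0 0 0 0 0 0 =
        (((drsBounds (drsTemp u) 0 [] 0).1.length : Int),
         PySem.List.maxD (((drsBounds (drsTemp u) 0 [] 0).1.zip
             ((drsBounds (drsTemp u) 0 [] 0).1.drop 1 ++ [((drsTemp u).length : Int)])).map
             (fun p => p.2 - p.1)) (fun y => y) 0,
         max ((PySem.List.count (drsTemp u) 1 : Int))
           ((PySem.List.count (drsTemp u) (-1) : Int))) := by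
    intro u
    have := loop_eq (drsTemp u) [] 0 0 0 0 0 0 ((drsTemp u).length : Int)
      (drsTemp_mem u) (by simp) (fun _ => ⟨rfl, rfl⟩) (fun b hb => by simp at hb)
      (by simp [drsIMax, drsIGaps]) (by simp) (fun b hb => by simp at hb)
    simpa using this
  by_cases hb : PySem.List.pyGetD stats 2 0 = 0
  · simp only [hb, if_true]
    rw [temp_eq dataset]
    exact main dataset
  · simp only [if_neg hb]
    rw [chunks_eq dataset, whileW_eq dataset, temp_eq (drsChunks dataset)]
    exact main (drsChunks dataset)
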